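-- pv_equiv track=rewrite | github.com/dpreese/CS453-Projects | Project 3/src/snippet_generator.py | longest_contiguous_run
-- ===== SOURCE A (Python) =====
-- def longest_contiguous_run(tokens, query_terms):
--     max_run = 0
--     current_run = 0
--     for token in tokens:
--         if token in query_terms:
--             current_run += 1
--             max_run = max(max_run, current_run)
--         else:
--             current_run = 0
--     return max_run
-- ===== SOURCE B (Python) =====
-- def longest_contiguous_run(tokens, query_terms):
--     # Group-then-reduce: collect the lengths of all maximal runs of
--     # query-term members, then take the maximum (0 if there are none).
--     qs = set(query_terms)
--     runs = []
--     i, n = 0, len(tokens)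
--     while i < n:
--         if tokens[i] in qs:
--             j = i
--             while j < n and tokens[j] in qs:
--                 j += 1
--             runs.append(j - i)
--             i = j
--         else:
--             i += 1
--     return max(runs, default=0)
-- ===== Notes on version B (the rewrite author's own statement) =====
-- stated objective: alternative
-- what changed: Replaces the running-counter-with-reset loop by a group-then-reduce decomposition: tokens are segmented into maximal runs of query-term members and the answer is the max of the collected run lengths, default 0.
import Mathlib
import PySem

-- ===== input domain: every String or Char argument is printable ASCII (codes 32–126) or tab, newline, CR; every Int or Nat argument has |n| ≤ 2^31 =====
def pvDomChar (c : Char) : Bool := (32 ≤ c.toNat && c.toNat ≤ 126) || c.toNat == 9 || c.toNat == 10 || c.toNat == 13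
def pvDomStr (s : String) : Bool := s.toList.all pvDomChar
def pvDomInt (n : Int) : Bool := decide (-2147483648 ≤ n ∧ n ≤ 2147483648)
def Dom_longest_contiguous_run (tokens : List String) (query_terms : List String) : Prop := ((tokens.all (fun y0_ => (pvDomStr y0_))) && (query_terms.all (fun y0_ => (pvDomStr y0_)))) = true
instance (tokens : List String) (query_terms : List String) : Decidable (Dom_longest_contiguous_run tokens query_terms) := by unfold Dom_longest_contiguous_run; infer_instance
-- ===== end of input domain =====

-- B replaces A's running-counter-with-reset loop by segmenting tokens into
-- maximal runs of query-term members and taking the maximum run length.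

-- ===== PORT A =====
-- Literal port of A: one fold carrying (max_run, current_run).
def longest_contiguous_run (tokens : List String) (query_terms : List String) : Int :=
  (tokens.foldl
    (fun (p : Int × Int) token =>
      if token ∈ query_terms then (max p.1 (p.2 + 1), p.2 + 1) else (p.1, 0))
    (0, 0)).1

-- ===== PORT B =====
-- length of the maximal member-prefix (the inner `while j < n and tokens[j] in qs` count)
def pvRunLen (qs : PySem.Set String) : List String → Nat
  | [] => 0
  | t :: rest => if PySem.Set.contains qs t then 1 + pvRunLen qs rest else 0

-- the list of maximal run lengths (the outer while loop collecting `runs`)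
def pvRuns (qs : PySem.Set String) : List String → List Int
  | [] => []
  | t :: rest =>
      if PySem.Set.contains qs t then
        ((1 + pvRunLen qs rest : Nat) : Int) :: pvRuns qs (rest.drop (pvRunLen qs rest))
      else pvRuns qs rest
termination_by ts => ts.length
decreasing_by all_goals (simp [List.length_drop]; try omega)

def longest_contiguous_run_alt (tokens : List String) (query_terms : List String) : Int :=
  let qs := PySem.Set.ofList query_terms
  match PySem.List.max? (pvRuns qs tokens) (fun x => x) with
  | some m => m
  | none => 0

-- ===== PRECONDITION & SPEC =====
def Spec_longest_contiguous_run (tokens : List String) (query_terms : List String) (out : Int) : Prop := out = longest_contiguous_run_alt tokens query_terms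
instance (tokens : List String) (query_terms : List String) (out : Int) : Decidable (Spec_longest_contiguous_run tokens query_terms out) := by unfold Spec_longest_contiguous_run; infer_instance

-- ===== CLAIM (what is proved, stated in full; the proofs are below) =====
def Claim_equal_longest_contiguous_run : Prop := ∀ (tokens : List String) (query_terms : List String), Dom_longest_contiguous_run tokens query_terms → Spec_longest_contiguous_run tokens query_terms (longest_contiguous_run tokens query_terms)

-- ===== LEMMAS AND PROOFS =====

-- membership bridge: the set built from query_terms tests the same membership A tests
theorem pv_contains_iff (qts : List String) (t : String) :
    PySem.Set.contains (PySem.Set.ofList qts) t = true ↔ t ∈ qts := by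
  simp [PySem.Set.contains, PySem.Set.mem_ofList]

-- A's step function
def pvStepA (qts : List String) (p : Int × Int) (token : String) : Int × Int :=
  if token ∈ qts then (max p.1 (p.2 + 1), p.2 + 1) else (p.1, 0)

-- consuming the maximal member-prefix from state (m, c) with c ≤ m
theorem pv_consume_run (qts : List String) (ts : List String) :
    ∀ m c : Int, c ≤ m →
      ts.foldl (pvStepA qts) (m, c) =
        (ts.drop (pvRunLen (PySem.Set.ofList qts) ts)).foldl (pvStepA qts)
          (max m (c + (pvRunLen (PySem.Set.ofList qts) ts : Nat)), c + (pvRunLen (PySem.Set.ofList qts) ts : Nat)) := by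
  induction ts with
  | nil =>
    intro m c h
    simp [pvRunLen]
    omega
  | cons t rest ih =>
    intro m c h
    by_cases ht : t ∈ qts
    · have hc : PySem.Set.contains (PySem.Set.ofList qts) t = true := (pv_contains_iff qts t).mpr ht
      have hj : pvRunLen (PySem.Set.ofList qts) (t :: rest) = pvRunLen (PySem.Set.ofList qts) rest + 1 := by
        simp [pvRunLen, ht, Nat.add_comm]
      rw [hj, List.drop_succ_cons]
      simp only [List.foldl_cons, pvStepA, if_pos ht]
      rw [ih (max m (c + 1)) (c + 1) (by omega)]
      congr 1
      simp only [Prod.mk.injEq]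
      push_cast
      omega
    · have hc' : PySem.Set.contains (PySem.Set.ofList qts) t = false := by
        rcases Bool.eq_false_or_eq_true (PySem.Set.contains (PySem.Set.ofList qts) t) with h' | h'
        · exact absurd ((pv_contains_iff qts t).mp h') ht
        · exact h'
      have hj : pvRunLen (PySem.Set.ofList qts) (t :: rest) = 0 := by
        simp [pvRunLen, ht]
      rw [hj]
      simp only [Nat.cast_zero, add_zero, List.drop_zero]
      have hm : max m c = m := by omega
      rw [hm]

-- after dropping the maximal member-prefix, the next run length is 0
theorem pv_runLen_drop (qs : PySem.Set String) (ts : List String) :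
    pvRunLen qs (ts.drop (pvRunLen qs ts)) = 0 := by
  induction ts with
  | nil => simp [pvRunLen]
  | cons t rest ih =>
    by_cases hc : PySem.Set.contains qs t = true
    · have hm : t ∈ qs := by simpa [PySem.Set.contains] using hc
      have hj : pvRunLen qs (t :: rest) = pvRunLen qs rest + 1 := by
        simp [pvRunLen, hm, Nat.add_comm]
      rw [hj, List.drop_succ_cons]
      exact ih
    · have hc' : PySem.Set.contains qs t = false := by
        rcases Bool.eq_false_or_eq_true (PySem.Set.contains qs t) with h' | h'
        · exact absurd h' hc
        · exact h'
      have hm : t ∉ qs := by simpa [PySem.Set.contains] using hc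
      have hj : pvRunLen qs (t :: rest) = 0 := by simp [pvRunLen, hm]
      rw [hj, List.drop_zero, hj]

-- starting current_run makes no difference when the head is not a member
theorem pv_reset (qts : List String) (ts : List String) (m c : Int)
    (h : pvRunLen (PySem.Set.ofList qts) ts = 0) :
    (ts.foldl (pvStepA qts) (m, c)).1 = (ts.foldl (pvStepA qts) (m, 0)).1 := by
  cases ts with
  | nil => rfl
  | cons t rest =>
    have ht : t ∉ qts := by
      intro hmem
      simp [pvRunLen, PySem.Set.mem_ofList, hmem] at h
    simp [pvStepA, ht]

-- every collected run length is at least 1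
theorem pv_runs_pos (qs : PySem.Set String) (ts : List String) :
    ∀ r ∈ pvRuns qs ts, 1 ≤ r := by
  induction ts using pvRuns.induct qs with
  | case1 => simp [pvRuns]
  | case2 t rest hc ih =>
    have hm : t ∈ qs := by simpa [PySem.Set.contains] using hc
    intro r hr
    rw [show pvRuns qs (t :: rest)
        = ((1 + pvRunLen qs rest : Nat) : Int) :: pvRuns qs (rest.drop (pvRunLen qs rest))
        from by simp [pvRuns, hm]] at hr
    rcases List.mem_cons.mp hr with h | h
    · subst h; push_cast; omega
    · exact ih r h
  | case3 t rest hc ih =>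
    have hm : t ∉ qs := by simpa [PySem.Set.contains] using hc
    intro r hr
    rw [show pvRuns qs (t :: rest) = pvRuns qs rest from by simp [pvRuns, hm]] at hr
    exact ih r hr

-- main invariant: A's fold from (m, 0) computes the running max of m over the run lengths
theorem pv_main (qts : List String) (ts : List String) :
    ∀ m : Int, 0 ≤ m → (ts.foldl (pvStepA qts) (m, 0)).1 =
      (pvRuns (PySem.Set.ofList qts) ts).foldl max m := by
  induction ts using pvRuns.induct (PySem.Set.ofList qts) with
  | case1 => intro m _; simp [pvRuns]
  | case2 t rest hc ih =>
    intro m hm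
    have ht : t ∈ qts := (pv_contains_iff qts t).mp hc
    have hj : pvRunLen (PySem.Set.ofList qts) (t :: rest) = pvRunLen (PySem.Set.ofList qts) rest + 1 := by
      simp [pvRunLen, PySem.Set.mem_ofList, ht, Nat.add_comm]
    have h1 := pv_consume_run qts (t :: rest) m 0 hm
    rw [hj, List.drop_succ_cons] at h1
    have h2 := pv_runLen_drop (PySem.Set.ofList qts) (t :: rest)
    rw [hj, List.drop_succ_cons] at h2
    rw [h1, pv_reset qts _ _ _ h2, ih _ (by positivity)]
    rw [show pvRuns (PySem.Set.ofList qts) (t :: rest)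
        = ((1 + pvRunLen (PySem.Set.ofList qts) rest : Nat) : Int)
          :: pvRuns (PySem.Set.ofList qts) (rest.drop (pvRunLen (PySem.Set.ofList qts) rest))
        from by simp [pvRuns, PySem.Set.mem_ofList, ht]]
    rw [List.foldl_cons]
    congr 1
    push_cast
    omega
  | case3 t rest hc ih =>
    intro m hm
    have ht : t ∉ qts := fun hmem => hc ((pv_contains_iff qts t).mpr hmem)
    rw [show pvRuns (PySem.Set.ofList qts) (t :: rest) = pvRuns (PySem.Set.ofList qts) rest
        from by simp [pvRuns, PySem.Set.mem_ofList, ht]]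
    rw [List.foldl_cons, show pvStepA qts (m, 0) t = (m, 0) from by simp [pvStepA, ht]]
    exact ih m hm

-- ===== VERDICT (by name: the statement is the Claim_ definition above) =====
theorem longest_contiguous_run_spec : Claim_equal_longest_contiguous_run := by
  intro tokens qts _
  show longest_contiguous_run tokens qts = longest_contiguous_run_alt tokens qts
  have hA : longest_contiguous_run tokens qts = (tokens.foldl (pvStepA qts) (0, 0)).1 := rfl
  rw [hA, pv_main qts tokens 0 le_rfl]
  show _ = (match PySem.List.max? (pvRuns (PySem.Set.ofList qts) tokens) (fun x => x) with
    | some m => m | none => (0 : Int))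
  cases hr : pvRuns (PySem.Set.ofList qts) tokens with
  | nil => simp [PySem.List.max?]
  | cons x rs =>
    rw [PySem.List.max?_id_cons]
    have hx : (1 : Int) ≤ x := pv_runs_pos _ tokens x (by rw [hr]; exact List.mem_cons_self ..)
    simp only [List.foldl_cons]
    have h0 : max (0 : Int) x = x := by omega
    rw [h0]
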